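-- pv_equiv track=rewrite | github.com/kitaee/Algorithm-Study | Baekjoon/3_week/kitae/예산 (2512).py | calculate
-- ===== SOURCE A (Python) =====
-- def calculate(moneyRequest, money, M):
--   sum = 0
--   for request in moneyRequest:
--     if request <= money:
--       sum += request
--     else:
--       sum += money
--
--     if sum > M:
--       break
--   return sum
-- ===== SOURCE B (Python) =====
-- def calculate(moneyRequest, money, M):
--     # Phase 1: build the full table of running prefix sums of min(r, money).
--     prefixes = []
--     total = 0
--     for r in moneyRequest:
--         total += min(r, money)
--         prefixes.append(total)
--     # Phase 2: return the first prefix exceeding M, else the last one (0 if empty).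
--     for p in prefixes:
--         if p > M:
--             return p
--     return prefixes[-1] if prefixes else 0
-- ===== Notes on version B (the rewrite author's own statement) =====
-- stated objective: alternative
-- what changed: A's single fused loop with an early break is replaced by two phases: first materialize the whole list of running prefix sums of min(r, money), then a separate search pass returning the first prefix strictly above M (or the last prefix, 0 if empty).
import Mathlib
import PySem

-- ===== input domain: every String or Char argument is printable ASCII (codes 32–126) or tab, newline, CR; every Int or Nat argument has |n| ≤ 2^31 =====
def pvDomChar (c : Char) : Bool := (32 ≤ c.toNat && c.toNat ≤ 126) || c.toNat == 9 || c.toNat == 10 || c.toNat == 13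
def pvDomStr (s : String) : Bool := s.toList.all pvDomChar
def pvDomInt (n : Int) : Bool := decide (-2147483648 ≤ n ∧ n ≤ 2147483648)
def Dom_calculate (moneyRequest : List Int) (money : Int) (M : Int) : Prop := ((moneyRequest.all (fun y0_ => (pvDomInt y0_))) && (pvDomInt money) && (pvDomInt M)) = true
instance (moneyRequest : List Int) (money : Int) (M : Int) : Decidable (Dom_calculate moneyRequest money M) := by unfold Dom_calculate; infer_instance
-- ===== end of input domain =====

-- B replaces A's fused loop-with-early-break by a two-phase version (build the full
-- prefix-sum table, then search it); objective: alternative decomposition, same cost.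


-- ===== PORT A =====
-- A's for-loop with early break, as structural recursion over the same state `sum`.
def calcLoopA (moneyRequest : List Int) (money : Int) (M : Int) (sum : Int) : Int :=
  match moneyRequest with
  | [] => sum
  | request :: rest =>
    let s := if request ≤ money then sum + request else sum + money
    if s > M then s else calcLoopA rest money M s

def calculate (moneyRequest : List Int) (money : Int) (M : Int) : Int :=
  calcLoopA moneyRequest money M 0

-- ===== PORT B =====
-- Phase 1 of Source B: the list of running prefix sums of min(r, money).
def pfxB (moneyRequest : List Int) (money : Int) (total : Int) : List Int :=
  match moneyRequest with
  | [] => []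
  | r :: rest =>
    let t := total + min r money
    t :: pfxB rest money t

-- Phase 2 of Source B: first prefix strictly above M, if any.
def findB (prefixes : List Int) (M : Int) : Option Int :=
  match prefixes with
  | [] => none
  | p :: rest => if p > M then some p else findB rest M

def calculate_alt (moneyRequest : List Int) (money : Int) (M : Int) : Int :=
  let prefixes := pfxB moneyRequest money 0
  match findB prefixes M with
  | some p => p
  | none => prefixes.getLastD 0

-- ===== PRECONDITION & SPEC =====
def Spec_calculate (moneyRequest : List Int) (money : Int) (M : Int) (out : Int) : Prop := out = calculate_alt moneyRequest money M
instance (moneyRequest : List Int) (money : Int) (M : Int) (out : Int) : Decidable (Spec_calculate moneyRequest money M out) := by unfold Spec_calculate; infer_instance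

-- ===== CLAIM (what is proved, stated in full; the proofs are below) =====
def Claim_equal_calculate : Prop := ∀ (moneyRequest : List Int) (money : Int) (M : Int), Dom_calculate moneyRequest money M → Spec_calculate moneyRequest money M (calculate moneyRequest money M)

-- ===== LEMMAS AND PROOFS =====
theorem getLastD_shift (x t a : Int) (xs : List Int) :
    (x :: xs).getLastD t = (t :: x :: xs).getLastD a := by
  induction xs generalizing x t with
  | nil => rfl
  | cons y ys ih => exact ih y x

theorem calcLoopA_eq (moneyRequest : List Int) (money M : Int) :
    ∀ acc : Int, calcLoopA moneyRequest money M acc =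
      (match findB (pfxB moneyRequest money acc) M with
       | some p => p
       | none => (pfxB moneyRequest money acc).getLastD acc) := by
  induction moneyRequest with
  | nil => intro acc; simp [calcLoopA, pfxB, findB]
  | cons r rest ih =>
    intro acc
    have hmin : (if r ≤ money then acc + r else acc + money) = acc + min r money := by
      by_cases h : r ≤ money <;> simp [min_def, h] <;> omega
    simp only [calcLoopA, pfxB, findB, hmin]
    by_cases h : acc + min r money > M
    · simp [h]
    · simp only [if_neg h]
      rw [ih (acc + min r money)]
      cases hf : findB (pfxB rest money (acc + min r money)) M with
      | some p => simp
      | none =>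
        simp only []
        cases hrest : pfxB rest money (acc + min r money) with
        | nil => simp [List.getLastD]
        | cons x xs =>
          exact getLastD_shift x (acc + min r money) acc xs

-- ===== VERDICT (by name: the statement is the Claim_ definition above) =====
theorem calculate_spec : Claim_equal_calculate := by
  intro moneyRequest money M _
  unfold Spec_calculate calculate calculate_alt
  simpa using calcLoopA_eq moneyRequest money M 0
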